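-- pv_equiv track=rewrite | github.com/IgnacioSallaberry/RICS | p-valor critico.py | p_valor_minimize
-- ===== SOURCE A (Python) =====
-- def p_valor_minimize(int1, int2):
--
--     resta_de_p_val = []
--     i=0
--     while i <len(int1):
--         resta_de_p_val.append(abs(int1[i]-int2[i]))
--         i+=1
--
--     minimo_resta_p_val = resta_de_p_val.index(min(resta_de_p_val))
--
--     return minimo_resta_p_val
-- ===== SOURCE B (Python) =====
-- def p_valor_minimize(int1, int2):
--     best_i = len(int1) - 1
--     best_d = abs(int1[best_i] - int2[best_i])
--     for i in range(len(int1) - 2, -1, -1):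
--         d = abs(int1[i] - int2[i])
--         if d <= best_d:
--             best_i, best_d = i, d
--     return best_i
-- ===== Notes on version B (the rewrite author's own statement) =====
-- stated objective: alternative
-- what changed: Replaces A's three passes (build an explicit difference list, min() over it, list.index() to find the minimum) by one backward scan from the last index that keeps only the pair (best index, best value), overwriting on ties so the first occurrence wins; no intermediate list, no search pass, constant extra space.
import Mathlib
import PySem

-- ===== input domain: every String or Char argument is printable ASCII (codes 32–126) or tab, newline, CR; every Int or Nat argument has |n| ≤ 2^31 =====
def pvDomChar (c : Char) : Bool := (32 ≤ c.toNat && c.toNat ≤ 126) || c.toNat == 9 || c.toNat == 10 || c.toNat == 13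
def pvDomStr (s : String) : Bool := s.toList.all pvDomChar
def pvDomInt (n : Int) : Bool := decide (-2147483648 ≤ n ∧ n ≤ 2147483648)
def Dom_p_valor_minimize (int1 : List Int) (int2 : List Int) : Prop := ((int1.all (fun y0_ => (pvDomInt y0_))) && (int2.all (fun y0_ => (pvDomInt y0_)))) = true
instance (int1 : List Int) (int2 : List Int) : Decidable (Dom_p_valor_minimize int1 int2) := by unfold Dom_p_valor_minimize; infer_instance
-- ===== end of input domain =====

-- B replaces A's three passes (build the difference list, min over it, index of the min) by one
-- backward scan keeping only (best index, best value), overwriting on ties so the first wins.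

-- ===== PORT A =====
-- the while-loop building resta_de_p_val (indexing is in range under Pre_)
def pvA_loop (int1 : List Int) (int2 : List Int) (i : Nat) (acc : List Int) : List Int :=
  if i < int1.length then
    pvA_loop int1 int2 (i + 1)
      (acc ++ [|PySem.List.pyGetD int1 (i : Int) 0 - PySem.List.pyGetD int2 (i : Int) 0|])
  else acc
termination_by int1.length - i

def p_valor_minimize (int1 : List Int) (int2 : List Int) : Int :=
  let resta := pvA_loop int1 int2 0 []
  match PySem.List.min? resta (fun x => x) with
  | none => 0  -- min([]) raises ValueError in Python; excluded by Pre_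
  | some m => (((PySem.List.index? resta m).getD 0 : Nat) : Int)

-- ===== PORT B =====
def p_valor_minimize_alt (int1 : List Int) (int2 : List Int) : Int :=
  let bi : Int := (int1.length : Int) - 1
  -- int1[-1] on an empty int1 raises IndexError in Python; excluded by Pre_
  let bd : Int := |PySem.List.pyGetD int1 bi 0 - PySem.List.pyGetD int2 bi 0|
  let s := (PySem.List.pyRange ((int1.length : Int) - 2) (-1) (-1)).foldl
    (fun (s : Int × Int) i =>
      let d := |PySem.List.pyGetD int1 i 0 - PySem.List.pyGetD int2 i 0|
      if d ≤ s.2 then (i, d) else s) (bi, bd)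
  s.1

-- ===== PRECONDITION & SPEC =====
-- Pre_ excludes exactly the inputs where Python A raises: the empty int1 (ValueError from
-- min([])) and int2 shorter than int1 (IndexError at int2[i]).
def Pre_p_valor_minimize (int1 : List Int) (int2 : List Int) : Prop :=
  int1 ≠ [] ∧ int1.length ≤ int2.length
instance (int1 : List Int) (int2 : List Int) : Decidable (Pre_p_valor_minimize int1 int2) := by
  unfold Pre_p_valor_minimize; infer_instance

def pvWitness_p_valor_minimize : List Int × List Int := ([1, 3, 2], [2, 3, 7])

def Spec_p_valor_minimize (int1 : List Int) (int2 : List Int) (out : Int) : Prop :=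
  out = p_valor_minimize_alt int1 int2
instance (int1 : List Int) (int2 : List Int) (out : Int) : Decidable (Spec_p_valor_minimize int1 int2 out) := by
  unfold Spec_p_valor_minimize; infer_instance

-- ===== CLAIM (what is proved, stated in full; the proofs are below) =====
def Claim_equal_p_valor_minimize : Prop := ∀ (int1 : List Int) (int2 : List Int), Dom_p_valor_minimize int1 int2 → Pre_p_valor_minimize int1 int2 → Spec_p_valor_minimize int1 int2 (p_valor_minimize int1 int2)

-- ===== LEMMAS AND PROOFS =====

-- A's while loop is append-of-map over the remaining index range
theorem pvA_loop_eq (int1 int2 : List Int) (i : Nat) (acc : List Int) :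
    pvA_loop int1 int2 i acc =
      acc ++ (List.range' i (int1.length - i)).map
        (fun j => |int1.getD j 0 - int2.getD j 0|) := by
  fun_induction pvA_loop int1 int2 i acc with
  | case1 i acc h ih =>
      rw [ih]
      have h1 : int1.length - i = (int1.length - (i + 1)) + 1 := by omega
      rw [h1, List.range'_succ]
      simp [PySem.List.pyGetD_natCast]
  | case2 i acc h =>
      have h1 : int1.length - i = 0 := by omega
      simp [h1]

-- min? commutes with map (foldl-state argument)
theorem pv_min?_foldl_map_aux {α β κ : Type} [LT κ] [DecidableLT κ]
    (g : α → β) (key : β → κ) (xs : List α) (acc : Option α) :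
    List.foldl
      (fun acc x => match acc with
        | none => some x
        | some m => if key x < key m then some x else some m)
      (acc.map g) (xs.map g)
    = (List.foldl
        (fun acc x => match acc with
          | none => some x
          | some m => if key (g x) < key (g m) then some x else some m)
        acc xs).map g := by
  induction xs generalizing acc with
  | nil => rfl
  | cons x t ih =>
      cases acc with
      | none => simpa using ih (some x)
      | some m =>
          by_cases h : key (g x) < key (g m)
          · simpa [h] using ih (some x)
          · simpa [h] using ih (some m)

theorem pv_min?_map {α β κ : Type} [LT κ] [DecidableLT κ]
    (g : α → β) (key : β → κ) (xs : List α) :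
    PySem.List.min? (xs.map g) key
      = (PySem.List.min? xs (fun a => key (g a))).map g := by
  have := pv_min?_foldl_map_aux g key xs none
  simpa [PySem.List.min?] using this

-- min? over a snoc
theorem pv_min?_snoc {α κ : Type} [LT κ] [DecidableLT κ]
    (xs : List α) (x : α) (key : α → κ) :
    PySem.List.min? (xs ++ [x]) key
      = match PySem.List.min? xs key with
        | none => some x
        | some m => if key x < key m then some x else some m := by
  simp only [PySem.List.min?, List.foldl_append, List.foldl]
  rfl

-- min? over range n returns the FIRST argmin
theorem pv_min?_range_spec (f : Nat → Int) (n : Nat) (hn : 0 < n) :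
    ∃ j, PySem.List.min? (List.range n) f = some j ∧ j < n ∧
      (∀ i, i < n → f j ≤ f i) ∧ (∀ i, i < j → f j < f i) := by
  induction n with
  | zero => omega
  | succ n ih =>
      rcases Nat.eq_zero_or_pos n with h0 | hpos
      · subst h0
        refine ⟨0, ?_, by omega, ?_, ?_⟩
        · simp [PySem.List.min?, List.range_succ]
        · intro i hi; interval_cases i; exact le_refl _
        · intro i hi; omega
      · obtain ⟨j, hmin, hjn, hmin_le, hfirst⟩ := ih hpos
        rw [List.range_succ, pv_min?_snoc, hmin]
        by_cases hlt : f n < f j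
        · refine ⟨n, by simp [hlt], by omega, ?_, ?_⟩
          · intro i hi
            rcases Nat.lt_or_ge i n with h | h
            · exact le_of_lt (lt_of_lt_of_le hlt (hmin_le i h))
            · have : i = n := by omega
              subst this; exact le_refl _
          · intro i hi; exact lt_of_lt_of_le hlt (hmin_le i hi)
        · refine ⟨j, by simp [hlt], by omega, ?_, hfirst⟩
          intro i hi
          rcases Nat.lt_or_ge i n with h | h
          · exact hmin_le i h
          · have : i = n := by omega
            subst this; omega

-- first occurrence of the minimal value in the mapped range is its argmin index
theorem pv_index?_map_range (f : Nat → Int) (n j : Nat) (hjn : j < n)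
    (hfirst : ∀ i, i < j → f j < f i) :
    PySem.List.index? ((List.range n).map f) (f j) = some j := by
  rw [PySem.List.index?_eq_some_iff]
  refine ⟨(List.range j).map f, (List.range' (j + 1) (n - (j + 1))).map f, ?_, by simp, ?_⟩
  · have hsplit : List.range n = List.range j ++ j :: List.range' (j + 1) (n - (j + 1)) := by
      have h1 : List.range' j (n - j) 1 = j :: List.range' (j + 1) (n - (j + 1)) 1 := by
        have hnj : n - j = (n - (j + 1)) + 1 := by omega
        rw [hnj, List.range'_succ]
      calc List.range n = List.range' 0 n := List.range_eq_range'
        _ = List.range' 0 j ++ List.range' (0 + 1 * j) (n - j) := by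
              rw [List.range'_append]; congr 1; omega
        _ = List.range j ++ (j :: List.range' (j + 1) (n - (j + 1))) := by
              rw [← List.range_eq_range']; congr 1
              simpa using h1
    rw [hsplit]; simp
  · intro hmem
    rw [List.mem_map] at hmem
    obtain ⟨i, hi, hif⟩ := hmem
    rw [List.mem_range] at hi
    have := hfirst i hi
    omega

-- B's backward fold, with state (m, F m) characterising the first argmin of F over [k, n),
-- ends at the first argmin j of F over [0, n)
theorem pv_desc_fold (F : Int → Int) (n : Int) (j : Int)
    (hj0 : 0 ≤ j) (hjn : j < n)
    (hjmin : ∀ l : Int, 0 ≤ l → l < n → F j ≤ F l)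
    (hjfirst : ∀ l : Int, 0 ≤ l → l < j → F j < F l) :
    ∀ (k : Nat) (m : Int), (k : Int) ≤ m → m < n →
      (∀ l : Int, (k : Int) ≤ l → l < n → F m ≤ F l) →
      (∀ l : Int, (k : Int) ≤ l → l < m → F m < F l) →
      ((PySem.List.pyRange ((k : Int) - 1) (-1) (-1)).foldl
        (fun (s : Int × Int) i => if F i ≤ s.2 then (i, F i) else s) (m, F m)).1 = j := by
  intro k
  induction k with
  | zero =>
      intro m hkm hmn hmmin hmfirst
      rw [PySem.List.pyRange_neg_one_eq_nil (by omega)]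
      simp only [List.foldl_nil]
      -- uniqueness of the first argmin over [0, n)
      rcases lt_trichotomy m j with h | h | h
      · have h1 := hmmin j (by omega) hjn
        have h2 := hjfirst m (by omega) h
        omega
      · exact h
      · have h1 := hjmin m (by omega) hmn
        have h2 := hmfirst j (by omega) h
        omega
  | succ k ih =>
      intro m hkm hmn hmmin hmfirst
      have hcons : PySem.List.pyRange (((k : Nat) + 1 : Int) - 1) (-1) (-1)
          = (k : Int) :: PySem.List.pyRange ((k : Int) - 1) (-1) (-1) := by
        have : (((k : Nat) + 1 : Int) - 1) = (k : Int) := by omega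
        rw [this, PySem.List.pyRange_neg_one_cons (by omega)]
      have hk1 : (((k : Nat) + 1 : Nat) : Int) = ((k : Nat) + 1 : Int) := by push_cast; ring
      rw [hk1] at hkm ⊢
      rw [hcons]
      simp only [List.foldl_cons]
      by_cases h : F (k : Int) ≤ F m
      · rw [if_pos h]
        exact ih (k : Int) le_rfl (by omega)
          (fun l hl1 hl2 => by
            rcases eq_or_lt_of_le hl1 with he | hlt
            · rw [← he]
            · exact le_trans h (hmmin l (by omega) hl2))
          (fun l hl1 hl2 => by omega)
      · rw [if_neg h]
        have hmk : F m < F (k : Int) := by omega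
        exact ih m (by omega) hmn
          (fun l hl1 hl2 => by
            rcases eq_or_lt_of_le hl1 with he | hlt
            · rw [← he]; omega
            · exact hmmin l (by omega) hl2)
          (fun l hl1 hl2 => by
            rcases eq_or_lt_of_le hl1 with he | hlt
            · rw [← he]; exact hmk
            · exact hmfirst l (by omega) hl2)

-- ===== VERDICT (by name: the statement is the Claim_ definition above) =====
theorem p_valor_minimize_spec : Claim_equal_p_valor_minimize := by
  intro int1 int2 _ hpre
  obtain ⟨hne, _⟩ := hpre
  unfold Spec_p_valor_minimize
  set n := int1.length with hn
  have hnpos : 0 < n := List.length_pos_iff.mpr hne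
  set f : Nat → Int := fun j => |int1.getD j 0 - int2.getD j 0| with hf
  set F : Int → Int := fun i => |PySem.List.pyGetD int1 i 0 - PySem.List.pyGetD int2 i 0| with hF
  have hFf : ∀ k : Nat, F (k : Int) = f k := by
    intro k; simp [hF, hf, PySem.List.pyGetD_natCast, List.getD]
  -- the difference list
  have hresta : pvA_loop int1 int2 0 [] = (List.range n).map f := by
    rw [pvA_loop_eq]
    simp [List.range_eq_range', hf, List.getD]
    rw [← hn]
  obtain ⟨j, hmin, hjn, hjmin, hjfirst⟩ := pv_min?_range_spec f n hnpos
  -- A's side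
  have hA : p_valor_minimize int1 int2 = (j : Int) := by
    show (match PySem.List.min? (pvA_loop int1 int2 0 []) (fun x => x) with
          | none => (0 : Int)
          | some m => (((PySem.List.index? (pvA_loop int1 int2 0 []) m).getD 0 : Nat) : Int))
        = (j : Int)
    rw [hresta, pv_min?_map f (fun x => x) (List.range n)]
    simp only [hmin, Option.map_some]
    rw [pv_index?_map_range f n j hjn hjfirst]
    rfl
  -- B's side: the backward fold starting at (n-1, F (n-1)) reaches the first argmin
  have hB : p_valor_minimize_alt int1 int2 = (j : Int) := by
    have hj0 : (0 : Int) ≤ (j : Int) := by positivity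
    have hjn' : (j : Int) < (n : Int) := by exact_mod_cast hjn
    have hjminI : ∀ l : Int, 0 ≤ l → l < (n : Int) → F (j : Int) ≤ F l := by
      intro l hl1 hl2
      have hlt : l.toNat < n := by omega
      have : l = ((l.toNat : Nat) : Int) := by omega
      rw [this, hFf, hFf]
      exact hjmin _ hlt
    have hjfirstI : ∀ l : Int, 0 ≤ l → l < (j : Int) → F (j : Int) < F l := by
      intro l hl1 hl2
      have hlt : l.toNat < j := by omega
      have : l = ((l.toNat : Nat) : Int) := by omega
      rw [this, hFf, hFf]
      exact hjfirst _ hlt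
    have hm1 : (((n - 1 : Nat) : Int)) = (n : Int) - 1 := by omega
    have hstart := pv_desc_fold F (n : Int) (j : Int) hj0 hjn' hjminI hjfirstI
      (n - 1) ((n : Int) - 1) (by omega) (by omega)
      (fun l hl1 hl2 => by
        have : l = (n : Int) - 1 := by omega
        rw [this])
      (fun l hl1 hl2 => by omega)
    rw [hm1] at hstart
    show ((PySem.List.pyRange ((int1.length : Int) - 2) (-1) (-1)).foldl
        (fun (s : Int × Int) i =>
          let d := |PySem.List.pyGetD int1 i 0 - PySem.List.pyGetD int2 i 0|
          if d ≤ s.2 then (i, d) else s)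
        ((int1.length : Int) - 1,
         |PySem.List.pyGetD int1 ((int1.length : Int) - 1) 0
           - PySem.List.pyGetD int2 ((int1.length : Int) - 1) 0|)).1 = (j : Int)
    have h2 : (n : Int) - 1 - 1 = (n : Int) - 2 := by ring
    rw [← hn, ← h2]
    exact hstart
  rw [hA, hB]
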